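-- pv_equiv track=rewrite | github.com/postvakje/oeis-sequences | oeis-sequences/OEISsequences.py | A215728
-- ===== SOURCE A (Python) =====
-- from itertools import (
--     islice,
--     count,
--     product,
--     permutations,
--     takewhile,
--     accumulate,
--     combinations_with_replacement,
--     combinations,
--     repeat,
--     groupby,
--     chain,
-- )
--
-- def A215728(n):
--     l, x = [str(d) * n for d in range(10)], 1
--     for m in count(0):
--         s = str(x)
--         for k in l:
--             if k in s:
--                 return m
--         x *= 5
-- ===== SOURCE B (Python) =====
-- # B: same outer search over powers of 5, but the per-number test is a single
-- # groupby pass computing the longest run of equal digits instead of testing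
-- # ten precomputed repdigit strings for substring containment.
-- from itertools import count, groupby
--
--
-- def A215728(n):
--     x = 1
--     for m in count(0):
--         if max(sum(1 for _ in g) for _, g in groupby(str(x))) >= n:
--             return m
--         x *= 5
-- ===== Notes on version B (the rewrite author's own statement) =====
-- stated objective: alternative
-- what changed: The per-power test 'some of the ten repdigit strings str(d)*n is a substring of str(5^m)' is replaced by a single groupby pass computing the longest run of equal consecutive digits and comparing it with n; the outer search over powers of 5 is unchanged.
import Mathlib
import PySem

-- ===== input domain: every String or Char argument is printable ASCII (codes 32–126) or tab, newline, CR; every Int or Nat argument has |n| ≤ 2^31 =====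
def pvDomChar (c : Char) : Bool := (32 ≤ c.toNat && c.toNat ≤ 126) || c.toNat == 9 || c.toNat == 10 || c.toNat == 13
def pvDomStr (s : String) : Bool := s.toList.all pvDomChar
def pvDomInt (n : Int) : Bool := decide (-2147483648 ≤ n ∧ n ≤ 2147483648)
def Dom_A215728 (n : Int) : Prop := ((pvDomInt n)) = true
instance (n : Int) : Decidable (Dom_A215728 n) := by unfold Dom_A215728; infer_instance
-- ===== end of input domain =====

-- B replaces A's ten repdigit substring tests by one groupby pass computing the longest
-- run of equal digits (objective: alternative, same outer search over powers of 5).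
-- Both ports run their unbounded 'for m in count(0)' loop with the same fuel 3000; the
-- two loops agree iteration by iteration, so the equivalence holds for every n.

-- ===== PORT A =====
-- inner 'for k in l: if k in s: return m' returns m on the first hit; the returned value
-- does not depend on which k hits, so it is ported as List.any.
def pvLoopA (l : List (List Char)) : Nat → Int → Int → Int
  | 0, m, _ => m  -- fuel exhausted
  | fuel + 1, m, x =>
    let s := PySem.Int.toChars x
    if l.any (fun k => PySem.Chars.isIn k s) then m
    else pvLoopA l fuel (m + 1) (x * 5)

def A215728 (n : Int) : Int :=
  pvLoopA ((PySem.List.pyRange 0 10 1).map (fun d => PySem.List.pyRepeat (PySem.Int.toChars d) n))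
    3000 0 1

-- ===== PORT B =====
-- hand port of itertools.groupby over a string: the list of run lengths of equal chars
def pvGroupLens : List Char → List Nat
  | [] => []
  | c :: l =>
    (1 + (l.takeWhile (fun d => d == c)).length) :: pvGroupLens (l.dropWhile (fun d => d == c))
  termination_by s => s.length
  decreasing_by
    simpa using Nat.lt_succ_of_le (List.length_dropWhile_le _ _)

-- max(...) over the (always nonempty: str(x) ≠ '') groupby run lengths
def pvMaxRun (s : List Char) : Nat :=
  match pvGroupLens s with
  | [] => 0  -- never reached: str(x) is never empty
  | k :: t => t.foldl max k

def pvLoopB (n : Int) : Nat → Int → Int → Int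
  | 0, m, _ => m  -- fuel exhausted
  | fuel + 1, m, x =>
    if n ≤ (pvMaxRun (PySem.Int.toChars x) : Int) then m
    else pvLoopB n fuel (m + 1) (x * 5)

def A215728_alt (n : Int) : Int := pvLoopB n 3000 0 1

-- ===== PRECONDITION & SPEC =====
def Spec_A215728 (n : Int) (out : Int) : Prop := out = A215728_alt n
instance (n : Int) (out : Int) : Decidable (Spec_A215728 n out) := by unfold Spec_A215728; infer_instance

-- ===== CLAIM (what is proved, stated in full; the proofs are below) =====
def Claim_equal_A215728 : Prop := ∀ (n : Int), Dom_A215728 n → Spec_A215728 n (A215728 n)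

-- ===== LEMMAS AND PROOFS =====

theorem pvGroupLens_nil : pvGroupLens [] = [] := by
  rw [pvGroupLens.eq_def]

theorem pvGroupLens_cons (c : Char) (l : List Char) :
    pvGroupLens (c :: l) =
      (1 + (l.takeWhile (fun d => d == c)).length) :: pvGroupLens (l.dropWhile (fun d => d == c)) := by
  rw [pvGroupLens.eq_def]

-- head of dropWhile fails the predicate
theorem pv_head_dropWhile {α : Type} (p : α → Bool) (l : List α) (d : α)
    (h : (l.dropWhile p).head? = some d) : p d = false := by
  induction l with
  | nil => simp at h
  | cons c t ih =>
    rw [List.dropWhile_cons] at h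
    by_cases hc : p c
    · rw [if_pos hc] at h; exact ih h
    · rw [if_neg hc] at h; simp at h; subst h; simpa using hc

-- replicate n c is a prefix of (replicate m c ++ dw) iff n ≤ m, when dw does not start with c
theorem pv_repl_prefix_iff (n m : Nat) (c : Char) (dw : List Char)
    (hdw : ∀ d, dw.head? = some d → d ≠ c) :
    List.replicate n c <+: List.replicate m c ++ dw ↔ n ≤ m := by
  constructor
  · intro h
    by_contra hnm
    have hmn : m < n := by omega
    have hlen := h.length_le
    simp at hlen
    match dw with
    | [] => simp at hlen; omega
    | d :: dw' =>
      have hd : d ≠ c := hdw d rfl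
      have hm1 : m < (List.replicate n c).length := by simpa using hmn
      have hm2 : m < (List.replicate m c ++ d :: dw').length := by simp
      have := h.getElem (i := m) hm1
      rw [List.getElem_replicate] at this
      rw [List.getElem_append_right (by simp)] at this
      simp at this
      exact hd this.symm
  · intro h
    have h1 : List.replicate n c <+: List.replicate m c :=
      ⟨List.replicate (m - n) c, by rw [← List.replicate_add, Nat.add_sub_cancel' h]⟩
    exact h1.trans (List.prefix_append _ _)

-- an n-run infix of c :: l (n ≥ 1) is a prefix run of c or an infix run of l
theorem pv_exists_repl_cons (n : Nat) (hn : 1 ≤ n) (c : Char) (l : List Char) :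
    (∃ a, List.replicate n a <:+: c :: l) ↔
      (List.replicate n c <+: c :: l) ∨ (∃ a, List.replicate n a <:+: l) := by
  constructor
  · rintro ⟨a, ha⟩
    rcases List.infix_cons_iff.1 ha with hp | hi
    · left
      obtain ⟨n', rfl⟩ : ∃ n', n = n' + 1 := ⟨n - 1, by omega⟩
      rw [List.replicate_succ] at hp ⊢
      rcases List.cons_prefix_cons.1 hp with ⟨rfl, _⟩
      exact hp
    · exact Or.inr ⟨a, hi⟩
  · rintro (hp | ⟨a, hi⟩)
    · exact ⟨c, hp.isInfix⟩
    · exact ⟨a, hi.trans (List.suffix_cons c l).isInfix⟩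

-- peeling a maximal run: n-run infix of (replicate m c ++ dw) iff n ≤ m or n-run infix of dw
theorem pv_repl_split (n : Nat) (hn : 1 ≤ n) (c : Char) (dw : List Char)
    (hdw : ∀ d, dw.head? = some d → d ≠ c) :
    ∀ m : Nat, (∃ a, List.replicate n a <:+: List.replicate m c ++ dw) ↔
      n ≤ m ∨ (∃ a, List.replicate n a <:+: dw) := by
  intro m
  induction m with
  | zero =>
    simp only [List.replicate_zero, List.nil_append]
    constructor
    · intro h
      exact Or.inr h
    · rintro (h | h)
      · omega
      · exact h
  | succ m ih =>
    have hsplit : List.replicate (m + 1) c ++ dw = c :: (List.replicate m c ++ dw) := by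
      rw [List.replicate_succ, List.cons_append]
    rw [hsplit, pv_exists_repl_cons n hn, ← hsplit,
      pv_repl_prefix_iff n (m + 1) c dw hdw, ih]
    constructor
    · rintro (h | h | h)
      · exact Or.inl h
      · exact Or.inl (by omega)
      · exact Or.inr h
    · rintro (h | h)
      · exact Or.inl h
      · exact Or.inr (Or.inr h)

-- the key run characterisation: s has an n-run iff some groupby run length is ≥ n
theorem pv_run_iff_groupLens (n : Nat) (hn : 1 ≤ n) :
    ∀ s : List Char, (∃ a, List.replicate n a <:+: s) ↔ ∃ k ∈ pvGroupLens s, n ≤ k := by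
  intro s
  induction s using pvGroupLens.induct with
  | case1 =>
    rw [pvGroupLens_nil]
    constructor
    · rintro ⟨a, h⟩
      have := h.sublist.length_le
      simp at this
      omega
    · rintro ⟨k, hk, -⟩
      simp at hk
  | case2 c l ih =>
    have htw : List.takeWhile (fun d => d == c) l =
        List.replicate (List.takeWhile (fun d => d == c) l).length c :=
      List.eq_replicate_iff.2 ⟨rfl, fun b hb => by simpa using List.mem_takeWhile_imp hb⟩
    have hdecomp : c :: l =
        List.replicate (1 + (List.takeWhile (fun d => d == c) l).length) c ++
          List.dropWhile (fun d => d == c) l := by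
      conv_rhs => rw [List.replicate_add, List.replicate_one, ← htw]
      simp only [List.append_assoc, List.cons_append]
      rw [List.takeWhile_append_dropWhile]
      simp
    have hdw : ∀ d, (List.dropWhile (fun d => d == c) l).head? = some d → d ≠ c := by
      intro d hd
      have := pv_head_dropWhile (fun d => d == c) l d hd
      simpa using this
    rw [hdecomp, pv_repl_split n hn c _ hdw, ih, ← hdecomp, pvGroupLens_cons]
    simp only [List.mem_cons]
    constructor
    · rintro (h | ⟨k, hk, hnk⟩)
      · exact ⟨_, Or.inl rfl, by omega⟩
      · exact ⟨k, Or.inr hk, hnk⟩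
    · rintro ⟨k, hk | hk, hnk⟩
      · subst hk; exact Or.inl (by omega)
      · exact Or.inr ⟨k, hk, hnk⟩

-- n ≤ pvMaxRun s iff some groupby run length is ≥ n (n ≥ 1)
theorem pv_le_maxRun_iff (n : Nat) (hn : 1 ≤ n) (s : List Char) :
    n ≤ pvMaxRun s ↔ ∃ k ∈ pvGroupLens s, n ≤ k := by
  rcases hgl : pvGroupLens s with _ | ⟨k, t⟩
  · have hmr : pvMaxRun s = 0 := by unfold pvMaxRun; rw [hgl]
    rw [hmr]
    simp
    omega
  · have hmr : pvMaxRun s = t.foldl max k := by unfold pvMaxRun; rw [hgl]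
    rw [hmr]
    simp only [List.mem_cons]
    constructor
    · intro hle
      rcases PySem.List.foldl_max_mem t k with hm | hm
      · exact ⟨k, Or.inl rfl, by rw [hm] at hle; exact hle⟩
      · exact ⟨_, Or.inr hm, hle⟩
    · rintro ⟨j, hj | hj, hnj⟩
      · exact le_trans (hj ▸ hnj) (PySem.List.le_foldl_max t k).1
      · exact le_trans hnj ((PySem.List.le_foldl_max t k).2 j hj)

-- every char Nat.toDigitsCore emits (beyond the accumulator) is a digitChar below the base
theorem pv_toDigitsCore_mem (b : Nat) :
    ∀ (fuel n : Nat) (acc : List Char) (c : Char), 0 < b →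
      c ∈ Nat.toDigitsCore b fuel n acc → c ∈ acc ∨ ∃ k, k < b ∧ c = Nat.digitChar k := by
  intro fuel
  induction fuel with
  | zero => intro n acc c _ hc; exact Or.inl hc
  | succ fuel ih =>
    intro n acc c hb hc
    rw [Nat.toDigitsCore] at hc
    by_cases h0 : n / b = 0
    · simp only [h0] at hc
      rcases List.mem_cons.1 hc with h | h
      · exact Or.inr ⟨n % b, Nat.mod_lt _ hb, h⟩
      · exact Or.inl h
    · rw [if_neg h0] at hc
      rcases ih (n / b) (Nat.digitChar (n % b) :: acc) c hb hc with h | h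
      · rcases List.mem_cons.1 h with h' | h'
        · exact Or.inr ⟨n % b, Nat.mod_lt _ hb, h'⟩
        · exact Or.inl h'
      · exact Or.inr h

-- str(x) for x ≥ 0 consists of decimal digit characters only
theorem pv_toChars_digits (x : Int) (hx : 0 ≤ x) (c : Char)
    (hc : c ∈ PySem.Int.toChars x) :
    c ∈ ['0', '1', '2', '3', '4', '5', '6', '7', '8', '9'] := by
  unfold PySem.Int.toChars at hc
  rw [if_neg (by omega)] at hc
  unfold Nat.toDigits at hc
  rcases pv_toDigitsCore_mem 10 _ _ _ c (by omega) hc with h | ⟨k, hk, rfl⟩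
  · simp at h
  · interval_cases k <;> decide

-- the per-iteration guards of the two loops agree (x ≥ 0)
theorem pv_guard_iff (n x : Int) (hx : 0 ≤ x) :
    (((PySem.List.pyRange 0 10 1).map
        (fun d => PySem.List.pyRepeat (PySem.Int.toChars d) n)).any
      (fun k => PySem.Chars.isIn k (PySem.Int.toChars x)) = true) ↔
      n ≤ (pvMaxRun (PySem.Int.toChars x) : Int) := by
  have hrange : PySem.List.pyRange 0 10 1 = [0, 1, 2, 3, 4, 5, 6, 7, 8, 9] := by decide
  have hlist : (PySem.List.pyRange 0 10 1).map
      (fun d => PySem.List.pyRepeat (PySem.Int.toChars d) n) =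
      ['0', '1', '2', '3', '4', '5', '6', '7', '8', '9'].map
        (fun c => List.replicate n.toNat c) := by
    rw [hrange]
    simp only [List.map_cons, List.map_nil]
    rw [show PySem.Int.toChars 0 = ['0'] from by decide,
      show PySem.Int.toChars 1 = ['1'] from by decide,
      show PySem.Int.toChars 2 = ['2'] from by decide,
      show PySem.Int.toChars 3 = ['3'] from by decide,
      show PySem.Int.toChars 4 = ['4'] from by decide,
      show PySem.Int.toChars 5 = ['5'] from by decide,
      show PySem.Int.toChars 6 = ['6'] from by decide,
      show PySem.Int.toChars 7 = ['7'] from by decide,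
      show PySem.Int.toChars 8 = ['8'] from by decide,
      show PySem.Int.toChars 9 = ['9'] from by decide]
    simp [PySem.List.pyRepeat_singleton]
  rw [hlist]
  by_cases hn : n ≤ 0
  · constructor
    · intro _
      exact le_trans hn (Int.natCast_nonneg _)
    · intro _
      simp only [List.map_cons, List.map_nil, List.any_eq_true, List.mem_cons]
      refine ⟨List.replicate n.toNat '0', Or.inl rfl, ?_⟩
      have h0 : n.toNat = 0 := by omega
      rw [h0]
      exact PySem.Chars.isIn_nil _
  · have hn1 : 1 ≤ n.toNat := by omega
    have hcast : n ≤ (pvMaxRun (PySem.Int.toChars x) : Int) ↔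
        n.toNat ≤ pvMaxRun (PySem.Int.toChars x) := by omega
    rw [hcast, pv_le_maxRun_iff n.toNat hn1, ← pv_run_iff_groupLens n.toNat hn1]
    simp only [List.any_eq_true, List.mem_map]
    constructor
    · rintro ⟨k, ⟨a, _, rfl⟩, hin⟩
      exact ⟨a, (PySem.Chars.isIn_iff_infix _ _).1 hin⟩
    · rintro ⟨a, ha⟩
      have hmem : a ∈ PySem.Int.toChars x := by
        have : a ∈ List.replicate n.toNat a := by
          simp [List.mem_replicate]; omega
        exact ha.subset this
      exact ⟨List.replicate n.toNat a,
        ⟨a, pv_toChars_digits x hx a hmem, rfl⟩,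
        (PySem.Chars.isIn_iff_infix _ _).2 ha⟩

-- the two loops agree iteration by iteration
theorem pv_loop_eq (n : Int) :
    ∀ (fuel : Nat) (m x : Int), 0 ≤ x →
      pvLoopA ((PySem.List.pyRange 0 10 1).map
          (fun d => PySem.List.pyRepeat (PySem.Int.toChars d) n)) fuel m x =
        pvLoopB n fuel m x := by
  intro fuel
  induction fuel with
  | zero => intro m x _; rfl
  | succ fuel ih =>
    intro m x hx
    rw [pvLoopA, pvLoopB]
    by_cases hg : n ≤ (pvMaxRun (PySem.Int.toChars x) : Int)
    · rw [if_pos ((pv_guard_iff n x hx).2 hg), if_pos hg]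
    · rw [if_neg (fun h => hg ((pv_guard_iff n x hx).1 h)), if_neg hg]
      exact ih (m + 1) (x * 5) (by positivity)

-- ===== VERDICT (by name: the statement is the Claim_ definition above) =====
theorem A215728_spec : Claim_equal_A215728 := by
  intro n _
  unfold Spec_A215728 A215728 A215728_alt
  exact pv_loop_eq n 3000 0 1 (by norm_num)
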